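-- pv_equiv track=rewrite | github.com/cpdunne/cpdunne.github.io | string_functions.py | cs110_lstrip
-- ===== SOURCE A (Python) =====
-- def cs110_lstrip(string):
-- 	no_space = ""
-- 	da_value= ""
-- 	count = 0
-- 	for i in range(len(string)):
-- 		da_value = ord(string[i])
-- 		if da_value != 32:
-- 			break
-- 		else:
-- 			count += 1
-- 	for c in range(0 + count, len(string)):
-- 		da_value = ord(string[c])
-- 		no_space = no_space + str(chr(da_value))
-- 	return no_space
-- ===== SOURCE B (Python) =====
-- def cs110_lstrip(string):
--     return string.lstrip(' ')
-- ===== Notes on version B (the rewrite author's own statement) =====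
-- stated objective: idiomatic
-- what changed: Replaced A's two-pass count-then-rebuild-by-concatenation loops with a single str.lstrip(' ') call (explicit space argument so only the space character is stripped), ported as dropWhile-on-space followed by a slice-free rebuild.
import Mathlib
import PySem

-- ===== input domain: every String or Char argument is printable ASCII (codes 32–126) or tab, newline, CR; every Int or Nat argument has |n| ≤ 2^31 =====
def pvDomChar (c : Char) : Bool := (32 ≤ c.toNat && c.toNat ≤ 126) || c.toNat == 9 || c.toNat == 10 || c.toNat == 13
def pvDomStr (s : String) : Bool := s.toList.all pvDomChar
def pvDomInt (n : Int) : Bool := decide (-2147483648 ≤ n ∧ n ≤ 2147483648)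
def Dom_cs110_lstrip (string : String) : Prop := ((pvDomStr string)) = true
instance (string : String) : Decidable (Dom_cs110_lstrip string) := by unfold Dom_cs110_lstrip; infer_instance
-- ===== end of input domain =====

-- B replaces A's count-then-rebuild two-pass loops with the idiomatic string.lstrip(' ').

-- ===== PORT A =====
-- first loop: count leading spaces, with Python's 'break' modelled by a broken flag
def csLoop1 (cs : List Char) (idxs : List Nat) (st : Nat × Bool) : Nat × Bool :=
  idxs.foldl (fun st i =>
    if st.2 then st
    else if (cs.getD i ' ').toNat ≠ 32 then (st.1, true)
    else (st.1 + 1, st.2)) st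

def cs110_lstrip (string : String) : String :=
  let cs := string.toList
  let count := (csLoop1 cs (List.range cs.length) (0, false)).1
  -- second loop: rebuild the string character by character from index count
  let no_space :=
    (List.range' count (cs.length - count)).foldl
      (fun acc c => acc ++ [cs.getD c ' ']) ([] : List Char)
  String.mk no_space

-- ===== PORT B =====
def cs110_lstrip_alt (string : String) : String :=
  String.mk (string.toList.dropWhile (fun c => c == ' '))

-- ===== PRECONDITION & SPEC =====
def Spec_cs110_lstrip (string : String) (out : String) : Prop := out = cs110_lstrip_alt string
instance (string : String) (out : String) : Decidable (Spec_cs110_lstrip string out) := by unfold Spec_cs110_lstrip; infer_instance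

-- ===== CLAIM (what is proved, stated in full; the proofs are below) =====
def Claim_equal_cs110_lstrip : Prop := ∀ (string : String), Dom_cs110_lstrip string → Spec_cs110_lstrip string (cs110_lstrip string)

-- ===== LEMMAS AND PROOFS =====

-- once broken, loop 1 never changes state
lemma csLoop1_broken (cs : List Char) (idxs : List Nat) (c : Nat) :
    csLoop1 cs idxs (c, true) = (c, true) := by
  induction idxs with
  | nil => rfl
  | cons i rest ih => simpa [csLoop1, List.foldl_cons] using ih

-- loop 1 over range' a n (with a+n = length) counts the leading spaces of cs.drop a
lemma csLoop1_count (cs : List Char) (n : Nat) :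
    ∀ (a c : Nat), a + n = cs.length →
      (csLoop1 cs (List.range' a n) (c, false)).1
        = c + ((cs.drop a).takeWhile (fun c => c == ' ')).length := by
  induction n with
  | zero =>
    intro a c h
    have : cs.drop a = [] := List.drop_eq_nil_of_le (by omega)
    simp [csLoop1, this]
  | succ n ih =>
    intro a c h
    have ha : a < cs.length := by omega
    have hd : cs.drop a = cs[a] :: cs.drop (a + 1) := List.drop_eq_getElem_cons ha
    have hget : cs.getD a ' ' = cs[a] := List.getD_eq_getElem cs ' ' ha
    rw [List.range'_succ]
    simp only [csLoop1, List.foldl_cons] at ih ⊢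
    rw [if_neg Bool.false_ne_true, hget]
    by_cases hsp : cs[a] = ' '
    · rw [if_neg (by rw [hsp]; decide)]
      rw [ih (a + 1) (c + 1) (by omega), hd]
      simp [hsp]
      omega
    · rw [if_pos (by intro hc; exact hsp (Char.ext (UInt32.toNat_inj.mp hc)))]
      have hb := csLoop1_broken cs (List.range' (a + 1) n) c
      simp only [csLoop1] at hb
      rw [hb, hd]
      simp [hsp]

-- loop 2 over range' a n (a+n = length) appends cs.drop a to the accumulator
lemma csLoop2 (cs : List Char) (n : Nat) :
    ∀ (a : Nat) (acc : List Char), a + n = cs.length →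
      (List.range' a n).foldl (fun acc c => acc ++ [cs.getD c ' ']) acc
        = acc ++ cs.drop a := by
  induction n with
  | zero =>
    intro a acc h
    have : cs.drop a = [] := List.drop_eq_nil_of_le (by omega)
    simp [this]
  | succ n ih =>
    intro a acc h
    have ha : a < cs.length := by omega
    have hd : cs.drop a = cs[a] :: cs.drop (a + 1) := List.drop_eq_getElem_cons ha
    rw [List.range'_succ, List.foldl_cons, ih (a + 1) _ (by omega), hd,
      List.getD_eq_getElem cs ' ' ha]
    simp

lemma dropWhile_eq_drop_takeWhile (p : Char → Bool) (cs : List Char) :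
    cs.dropWhile p = cs.drop (cs.takeWhile p).length := by
  induction cs with
  | nil => rfl
  | cons x xs ih =>
    by_cases hx : p x
    · simp [List.dropWhile_cons, List.takeWhile_cons, hx, ih]
    · simp [List.dropWhile_cons, List.takeWhile_cons, hx]

-- ===== VERDICT (by name: the statement is the Claim_ definition above) =====
theorem cs110_lstrip_spec : Claim_equal_cs110_lstrip := by
  intro s _
  unfold Spec_cs110_lstrip cs110_lstrip cs110_lstrip_alt
  set cs := s.toList with hcs
  have h1 : (csLoop1 cs (List.range cs.length) (0, false)).1
      = (cs.takeWhile (fun c => c == ' ')).length := by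
    have := csLoop1_count cs cs.length 0 0 (by omega)
    simpa [List.range_eq_range'] using this
  have hle : (cs.takeWhile (fun c => c == ' ')).length ≤ cs.length :=
    (List.takeWhile_sublist _).length_le
  have h2 := csLoop2 cs (cs.length - (cs.takeWhile (fun c => c == ' ')).length)
      (cs.takeWhile (fun c => c == ' ')).length [] (by omega)
  simp only [h1, h2, List.nil_append]
  rw [dropWhile_eq_drop_takeWhile]
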